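-- pv_equiv track=rewrite | github.com/hifahd/personal_knowledge_assistant | src/document_processor.py | _extract_section_info
-- ===== SOURCE A (Python) =====
-- from typing import List, Dict, Any
--
-- def _extract_section_info(chunk: str, doc_type: str) -> Dict[str, Any]:
--     """Extract section information from chunk"""
--     chunk_lower = chunk.lower()
--
--     if doc_type == "resume":
--         if any(keyword in chunk_lower for keyword in ['education', 'degree', 'university']):
--             return {"section": "education"}
--         elif any(keyword in chunk_lower for keyword in ['experience', 'work', 'internship']):
--             return {"section": "experience"}
--         elif any(keyword in chunk_lower for keyword in ['skills', 'technologies', 'programming']):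
--             return {"section": "skills"}
--         elif any(keyword in chunk_lower for keyword in ['project', 'built', 'developed']):
--             return {"section": "projects"}
--
--     elif doc_type == "research":
--         if any(keyword in chunk_lower for keyword in ['abstract', 'summary']):
--             return {"section": "abstract"}
--         elif any(keyword in chunk_lower for keyword in ['introduction', 'background']):
--             return {"section": "introduction"}
--         elif any(keyword in chunk_lower for keyword in ['method', 'approach', 'implementation']):
--             return {"section": "methodology"}
--         elif any(keyword in chunk_lower for keyword in ['result', 'finding', 'outcome']):
--             return {"section": "results"}
--
--     return {"section": "content"}
-- ===== SOURCE B (Python) =====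
-- from typing import List, Dict, Any
--
-- # Flat keyword -> (priority, section) map; priorities encode A's rule order, so the
-- # minimum-priority hit is exactly the first rule A's if/elif chain would fire on.
-- _KEYWORD_TAGS = {
--     "resume": {
--         'education': (0, "education"), 'degree': (0, "education"), 'university': (0, "education"),
--         'experience': (1, "experience"), 'work': (1, "experience"), 'internship': (1, "experience"),
--         'skills': (2, "skills"), 'technologies': (2, "skills"), 'programming': (2, "skills"),
--         'project': (3, "projects"), 'built': (3, "projects"), 'developed': (3, "projects"),
--     },
--     "research": {
--         'abstract': (0, "abstract"), 'summary': (0, "abstract"),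
--         'introduction': (1, "introduction"), 'background': (1, "introduction"),
--         'method': (2, "methodology"), 'approach': (2, "methodology"), 'implementation': (2, "methodology"),
--         'result': (3, "results"), 'finding': (3, "results"), 'outcome': (3, "results"),
--     },
-- }
--
-- def _extract_section_info(chunk: str, doc_type: str) -> Dict[str, Any]:
--     """Collect ALL matching keyword tags, then pick the highest-priority one."""
--     chunk_lower = chunk.lower()
--     hits = [tag for kw, tag in _KEYWORD_TAGS.get(doc_type, {}).items() if kw in chunk_lower]
--     if not hits:
--         return {"section": "content"}
--     return {"section": min(hits)[1]}
-- ===== Notes on version B (the rewrite author's own statement) =====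
-- stated objective: alternative
-- what changed: Instead of A's ordered if/elif early-return scan, B flattens the rules into a keyword->(priority,section) map, collects ALL matching tags in one exhaustive pass, and returns the minimum-priority hit (min over tuples), defaulting to content when no keyword matches.
import Mathlib
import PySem

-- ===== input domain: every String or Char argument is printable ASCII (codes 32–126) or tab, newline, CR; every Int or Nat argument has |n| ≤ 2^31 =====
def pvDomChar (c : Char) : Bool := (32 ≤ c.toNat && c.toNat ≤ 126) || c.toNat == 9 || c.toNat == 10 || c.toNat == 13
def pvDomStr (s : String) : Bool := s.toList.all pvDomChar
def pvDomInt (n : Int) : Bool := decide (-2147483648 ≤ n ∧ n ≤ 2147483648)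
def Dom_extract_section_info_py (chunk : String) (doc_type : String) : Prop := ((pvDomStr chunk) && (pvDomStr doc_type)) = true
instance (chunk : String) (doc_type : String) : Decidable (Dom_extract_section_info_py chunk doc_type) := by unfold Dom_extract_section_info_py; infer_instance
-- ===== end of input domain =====

-- B replaces A's ordered if/elif early-return scan by an exhaustive pass collecting ALL
-- matching keyword tags from a flat keyword->(priority,section) map, then taking the
-- minimum-priority hit (alternative strategy, same cost).

-- ===== PORT A =====
-- literal transliteration of A's branch chain; any(kw in chunk_lower …) = List.any with PySem.Str.isIn
def extract_section_info_py (chunk : String) (doc_type : String) : List (String × String) :=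
  let chunk_lower := PySem.Str.lower chunk
  if doc_type == "resume" then
    if ["education", "degree", "university"].any (fun kw => PySem.Str.isIn kw chunk_lower) then
      [("section", "education")]
    else if ["experience", "work", "internship"].any (fun kw => PySem.Str.isIn kw chunk_lower) then
      [("section", "experience")]
    else if ["skills", "technologies", "programming"].any (fun kw => PySem.Str.isIn kw chunk_lower) then
      [("section", "skills")]
    else if ["project", "built", "developed"].any (fun kw => PySem.Str.isIn kw chunk_lower) then
      [("section", "projects")]
    else [("section", "content")]
  else if doc_type == "research" then
    if ["abstract", "summary"].any (fun kw => PySem.Str.isIn kw chunk_lower) then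
      [("section", "abstract")]
    else if ["introduction", "background"].any (fun kw => PySem.Str.isIn kw chunk_lower) then
      [("section", "introduction")]
    else if ["method", "approach", "implementation"].any (fun kw => PySem.Str.isIn kw chunk_lower) then
      [("section", "methodology")]
    else if ["result", "finding", "outcome"].any (fun kw => PySem.Str.isIn kw chunk_lower) then
      [("section", "results")]
    else [("section", "content")]
  else [("section", "content")]

-- ===== PORT B =====
-- the module-level flat map _KEYWORD_TAGS (dict of dicts, insertion order)
def pvKeywordTags : PySem.Dict String (PySem.Dict String (Int × String)) :=
  PySem.Dict.mk
    [("resume", PySem.Dict.mk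
        [("education", (0, "education")), ("degree", (0, "education")), ("university", (0, "education")),
         ("experience", (1, "experience")), ("work", (1, "experience")), ("internship", (1, "experience")),
         ("skills", (2, "skills")), ("technologies", (2, "skills")), ("programming", (2, "skills")),
         ("project", (3, "projects")), ("built", (3, "projects")), ("developed", (3, "projects"))]),
     ("research", PySem.Dict.mk
        [("abstract", (0, "abstract")), ("summary", (0, "abstract")),
         ("introduction", (1, "introduction")), ("background", (1, "introduction")),
         ("method", (2, "methodology")), ("approach", (2, "methodology")), ("implementation", (2, "methodology")),
         ("result", (3, "results")), ("finding", (3, "results")), ("outcome", (3, "results"))])]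

-- Python's min on (int, str) tuples: lexicographic, first minimum wins
def pvPairMin (a b : Int × String) : Int × String :=
  if b.1 < a.1 ∨ (b.1 = a.1 ∧ b.2 < a.2) then b else a

def extract_section_info_py_alt (chunk : String) (doc_type : String) : List (String × String) :=
  let chunk_lower := PySem.Str.lower chunk
  let hits := (PySem.Dict.getD pvKeywordTags doc_type PySem.Dict.empty).items.filterMap
    (fun p => if PySem.Str.isIn p.1 chunk_lower then some p.2 else none)
  match hits with
  | [] => [("section", "content")]
  | h :: t => [("section", (t.foldl pvPairMin h).2)]

-- ===== PRECONDITION & SPEC =====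
def Spec_extract_section_info_py (chunk : String) (doc_type : String) (out : List (String × String)) : Prop := out = extract_section_info_py_alt chunk doc_type
instance (chunk : String) (doc_type : String) (out : List (String × String)) : Decidable (Spec_extract_section_info_py chunk doc_type out) := by unfold Spec_extract_section_info_py; infer_instance

-- ===== CLAIM (what is proved, stated in full; the proofs are below) =====
def Claim_equal_extract_section_info_py : Prop := ∀ (chunk : String) (doc_type : String), Dom_extract_section_info_py chunk doc_type → Spec_extract_section_info_py chunk doc_type (extract_section_info_py chunk doc_type)

-- ===== LEMMAS AND PROOFS =====

-- pvPairMin keeps the accumulator when every later element has strictly larger priority or is the accumulator itself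
theorem pvPairMin_eq_left (t a : Int × String) (h : t.1 < a.1 ∨ a = t) : pvPairMin t a = t := by
  rcases h with h | rfl
  · unfold pvPairMin
    rw [if_neg]
    rintro (h' | ⟨h', -⟩) <;> omega
  · unfold pvPairMin
    rw [if_neg]
    rintro (h' | ⟨-, h'⟩)
    · omega
    · exact lt_irrefl _ h'

theorem pvFoldlMin_eq (t : Int × String) (l : List (Int × String)) (h : ∀ x ∈ l, t.1 < x.1 ∨ x = t) :
    l.foldl pvPairMin t = t := by
  induction l with
  | nil => rfl
  | cons a l ih =>
    rw [List.foldl_cons, pvPairMin_eq_left t a (h a (by simp))]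
    exact ih (fun x hx => h x (by simp [hx]))

-- every hit produced by the filterMap comes from one of the listed (keyword, tag) pairs
theorem pvMemHits {α β : Type} (g : α → β) (p : α → Prop) [DecidablePred p] (l : List α) (x : β)
    (hx : x ∈ l.filterMap (fun a => if p a then some (g a) else none)) : ∃ a ∈ l, x = g a := by
  rcases List.mem_filterMap.1 hx with ⟨a, ha, hfa⟩
  refine ⟨a, ha, ?_⟩
  by_cases hp : p a
  · rw [if_pos hp] at hfa
    exact (Option.some_inj.1 hfa).symm
  · rw [if_neg hp] at hfa
    exact absurd hfa (by simp)

-- literal dict lookups, evaluated once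
theorem pvLookup_resume : (pvKeywordTags.getD "resume" PySem.Dict.empty).items =
    [("education", ((0:Int), "education")), ("degree", (0, "education")), ("university", (0, "education")),
     ("experience", (1, "experience")), ("work", (1, "experience")), ("internship", (1, "experience")),
     ("skills", (2, "skills")), ("technologies", (2, "skills")), ("programming", (2, "skills")),
     ("project", (3, "projects")), ("built", (3, "projects")), ("developed", (3, "projects"))] := rfl

theorem pvLookup_research : (pvKeywordTags.getD "research" PySem.Dict.empty).items =
    [("abstract", ((0:Int), "abstract")), ("summary", (0, "abstract")),
     ("introduction", (1, "introduction")), ("background", (1, "introduction")),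
     ("method", (2, "methodology")), ("approach", (2, "methodology")), ("implementation", (2, "methodology")),
     ("result", (3, "results")), ("finding", (3, "results")), ("outcome", (3, "results"))] := rfl

-- ===== VERDICT (by name: the statement is the Claim_ definition above) =====
set_option maxHeartbeats 1000000 in
theorem extract_section_info_py_spec : Claim_equal_extract_section_info_py := by
  intro chunk doc_type _
  unfold Spec_extract_section_info_py extract_section_info_py extract_section_info_py_alt
  by_cases h1 : doc_type = "resume"
  · subst h1
    rw [pvLookup_resume]
    by_cases kh0 : PySem.Str.isIn "education" (PySem.Str.lower chunk) = true
    · simp_all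
      all_goals rw [pvFoldlMin_eq]
      all_goals first
        | rfl
        | (intro x hx; rcases pvMemHits _ _ _ _ hx with ⟨a, ha, rfl⟩; fin_cases ha <;> decide)
    by_cases kh1 : PySem.Str.isIn "degree" (PySem.Str.lower chunk) = true
    · simp_all
      all_goals rw [pvFoldlMin_eq]
      all_goals first
        | rfl
        | (intro x hx; rcases pvMemHits _ _ _ _ hx with ⟨a, ha, rfl⟩; fin_cases ha <;> decide)
    by_cases kh2 : PySem.Str.isIn "university" (PySem.Str.lower chunk) = true
    · simp_all
      all_goals rw [pvFoldlMin_eq]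
      all_goals first
        | rfl
        | (intro x hx; rcases pvMemHits _ _ _ _ hx with ⟨a, ha, rfl⟩; fin_cases ha <;> decide)
    by_cases kh3 : PySem.Str.isIn "experience" (PySem.Str.lower chunk) = true
    · simp_all
      all_goals rw [pvFoldlMin_eq]
      all_goals first
        | rfl
        | (intro x hx; rcases pvMemHits _ _ _ _ hx with ⟨a, ha, rfl⟩; fin_cases ha <;> decide)
    by_cases kh4 : PySem.Str.isIn "work" (PySem.Str.lower chunk) = true
    · simp_all
      all_goals rw [pvFoldlMin_eq]
      all_goals first
        | rfl
        | (intro x hx; rcases pvMemHits _ _ _ _ hx with ⟨a, ha, rfl⟩; fin_cases ha <;> decide)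
    by_cases kh5 : PySem.Str.isIn "internship" (PySem.Str.lower chunk) = true
    · simp_all
      all_goals rw [pvFoldlMin_eq]
      all_goals first
        | rfl
        | (intro x hx; rcases pvMemHits _ _ _ _ hx with ⟨a, ha, rfl⟩; fin_cases ha <;> decide)
    by_cases kh6 : PySem.Str.isIn "skills" (PySem.Str.lower chunk) = true
    · simp_all
      all_goals rw [pvFoldlMin_eq]
      all_goals first
        | rfl
        | (intro x hx; rcases pvMemHits _ _ _ _ hx with ⟨a, ha, rfl⟩; fin_cases ha <;> decide)
    by_cases kh7 : PySem.Str.isIn "technologies" (PySem.Str.lower chunk) = true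
    · simp_all
      all_goals rw [pvFoldlMin_eq]
      all_goals first
        | rfl
        | (intro x hx; rcases pvMemHits _ _ _ _ hx with ⟨a, ha, rfl⟩; fin_cases ha <;> decide)
    by_cases kh8 : PySem.Str.isIn "programming" (PySem.Str.lower chunk) = true
    · simp_all
      all_goals rw [pvFoldlMin_eq]
      all_goals first
        | rfl
        | (intro x hx; rcases pvMemHits _ _ _ _ hx with ⟨a, ha, rfl⟩; fin_cases ha <;> decide)
    by_cases kh9 : PySem.Str.isIn "project" (PySem.Str.lower chunk) = true
    · simp_all
      all_goals rw [pvFoldlMin_eq]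
      all_goals first
        | rfl
        | (intro x hx; rcases pvMemHits _ _ _ _ hx with ⟨a, ha, rfl⟩; fin_cases ha <;> decide)
    by_cases kh10 : PySem.Str.isIn "built" (PySem.Str.lower chunk) = true
    · simp_all
      all_goals rw [pvFoldlMin_eq]
      all_goals first
        | rfl
        | (intro x hx; rcases pvMemHits _ _ _ _ hx with ⟨a, ha, rfl⟩; fin_cases ha <;> decide)
    by_cases kh11 : PySem.Str.isIn "developed" (PySem.Str.lower chunk) = true
    · simp_all
    simp_all
  · by_cases h2 : doc_type = "research"
    · subst h2
      rw [pvLookup_research]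
      by_cases kh0 : PySem.Str.isIn "abstract" (PySem.Str.lower chunk) = true
      · simp_all
        all_goals rw [pvFoldlMin_eq]
        all_goals first
          | rfl
          | (intro x hx; rcases pvMemHits _ _ _ _ hx with ⟨a, ha, rfl⟩; fin_cases ha <;> decide)
      by_cases kh1 : PySem.Str.isIn "summary" (PySem.Str.lower chunk) = true
      · simp_all
        all_goals rw [pvFoldlMin_eq]
        all_goals first
          | rfl
          | (intro x hx; rcases pvMemHits _ _ _ _ hx with ⟨a, ha, rfl⟩; fin_cases ha <;> decide)
      by_cases kh2 : PySem.Str.isIn "introduction" (PySem.Str.lower chunk) = true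
      · simp_all
        all_goals rw [pvFoldlMin_eq]
        all_goals first
          | rfl
          | (intro x hx; rcases pvMemHits _ _ _ _ hx with ⟨a, ha, rfl⟩; fin_cases ha <;> decide)
      by_cases kh3 : PySem.Str.isIn "background" (PySem.Str.lower chunk) = true
      · simp_all
        all_goals rw [pvFoldlMin_eq]
        all_goals first
          | rfl
          | (intro x hx; rcases pvMemHits _ _ _ _ hx with ⟨a, ha, rfl⟩; fin_cases ha <;> decide)
      by_cases kh4 : PySem.Str.isIn "method" (PySem.Str.lower chunk) = true
      · simp_all
        all_goals rw [pvFoldlMin_eq]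
        all_goals first
          | rfl
          | (intro x hx; rcases pvMemHits _ _ _ _ hx with ⟨a, ha, rfl⟩; fin_cases ha <;> decide)
      by_cases kh5 : PySem.Str.isIn "approach" (PySem.Str.lower chunk) = true
      · simp_all
        all_goals rw [pvFoldlMin_eq]
        all_goals first
          | rfl
          | (intro x hx; rcases pvMemHits _ _ _ _ hx with ⟨a, ha, rfl⟩; fin_cases ha <;> decide)
      by_cases kh6 : PySem.Str.isIn "implementation" (PySem.Str.lower chunk) = true
      · simp_all
        all_goals rw [pvFoldlMin_eq]
        all_goals first
          | rfl
          | (intro x hx; rcases pvMemHits _ _ _ _ hx with ⟨a, ha, rfl⟩; fin_cases ha <;> decide)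
      by_cases kh7 : PySem.Str.isIn "result" (PySem.Str.lower chunk) = true
      · simp_all
        all_goals rw [pvFoldlMin_eq]
        all_goals first
          | rfl
          | (intro x hx; rcases pvMemHits _ _ _ _ hx with ⟨a, ha, rfl⟩; fin_cases ha <;> decide)
      by_cases kh8 : PySem.Str.isIn "finding" (PySem.Str.lower chunk) = true
      · simp_all
        all_goals rw [pvFoldlMin_eq]
        all_goals first
          | rfl
          | (intro x hx; rcases pvMemHits _ _ _ _ hx with ⟨a, ha, rfl⟩; fin_cases ha <;> decide)
      by_cases kh9 : PySem.Str.isIn "outcome" (PySem.Str.lower chunk) = true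
      · simp_all
      simp_all
    · simp [pvKeywordTags, PySem.Dict.getD, PySem.Dict.get?, PySem.Dict.empty, h1, h2,
            show ("resume" == doc_type) = false from beq_eq_false_iff_ne.mpr (fun h => h1 h.symm),
            show ("research" == doc_type) = false from beq_eq_false_iff_ne.mpr (fun h => h2 h.symm)]
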